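-- pv_equiv track=rewrite | github.com/CodingGuilhem/projet_comparaison_assemblage | Python_project/forth_try.py | dictionary_in_dictionary
-- ===== SOURCE A (Python) =====
-- def into_dictionary(dictionary: dict, key, *input_args) -> dict:
--     """
--     Function to put the input_args in the dictionary. If the key already exists, the input_args will be combined with the existing arguments.
--     If the key doesn't exist, it will be created.
--     Input: dict - The dictionary where you want to put the arguments
--            key - The key of the dictionary
--            *input_args - The arguments you want to add to the dictionary
--     Output: dict - The updated dictionary
--     """
--     if key in dictionary:
--         dictionary[key] += list(input_args)
--     else:
--         dictionary[key] = list(input_args)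
--
-- def delete_value_from_dict(dictionary, value):
--     keys_to_delete = []
--     for key, val in dictionary.items():
--         if val == value:
--             keys_to_delete.append(key)
--     for key in keys_to_delete:
--         del dictionary[key]
--
-- def dictionary_in_dictionary(dictionary : dict, dictionary_to_add : dict) -> dict :
--
--     """
--     Function that add a dictionary into another dictionary
--     Input : dict : The dictionary that will be added to the other dictionary, dict : The dictionary that will be added
--     Output : dict : The first dictionary with the second dictionary added to it
--
--     """
--     for key in dictionary_to_add.keys() :
--         if dictionary_to_add[key] not in dictionary.values() :
--             dictionary[key] = dictionary_to_add[key]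
--         else :
--             delete_value_from_dict(dictionary,dictionary_to_add[key])
--             into_dictionary(dictionary,key,dictionary_to_add[key][0])
--     return dictionary
-- ===== SOURCE B (Python) =====
-- # Faster re-implementation: maintains a reverse index value->keys so the per-key
-- # value-membership scan and the delete scan of A disappear (O(m+n) expected).
-- # Mutates `dictionary` in place, like A.
-- def dictionary_in_dictionary(dictionary: dict, dictionary_to_add: dict) -> dict:
--     index = {}  # tuple(value) -> list of keys of `dictionary` currently holding that value
--     for k, v in dictionary.items():
--         index.setdefault(tuple(v), []).append(k)
--
--     def unindex(k):
--         tv = tuple(dictionary[k])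
--         ks = index[tv]
--         ks.remove(k)
--         if not ks:
--             del index[tv]
--
--     for key, value in dictionary_to_add.items():
--         tv = tuple(value)
--         if tv not in index:
--             if key in dictionary:
--                 unindex(key)
--             dictionary[key] = value
--             index.setdefault(tv, []).append(key)
--         else:
--             for k in index.pop(tv):
--                 del dictionary[k]
--             if key in dictionary:
--                 unindex(key)
--                 dictionary[key] = dictionary[key] + [value[0]]
--             else:
--                 dictionary[key] = [value[0]]
--             index.setdefault(tuple(dictionary[key]), []).append(key)
--     return dictionary
-- ===== Notes on version B (the rewrite author's own statement) =====
-- stated objective: faster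
-- what changed: B builds and incrementally maintains a reverse index (value tuple -> list of keys) so A's per-key linear scans of dictionary.values() and delete_value_from_dict's full scan disappear; membership tests and bulk deletions become hash lookups.
import Mathlib
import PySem

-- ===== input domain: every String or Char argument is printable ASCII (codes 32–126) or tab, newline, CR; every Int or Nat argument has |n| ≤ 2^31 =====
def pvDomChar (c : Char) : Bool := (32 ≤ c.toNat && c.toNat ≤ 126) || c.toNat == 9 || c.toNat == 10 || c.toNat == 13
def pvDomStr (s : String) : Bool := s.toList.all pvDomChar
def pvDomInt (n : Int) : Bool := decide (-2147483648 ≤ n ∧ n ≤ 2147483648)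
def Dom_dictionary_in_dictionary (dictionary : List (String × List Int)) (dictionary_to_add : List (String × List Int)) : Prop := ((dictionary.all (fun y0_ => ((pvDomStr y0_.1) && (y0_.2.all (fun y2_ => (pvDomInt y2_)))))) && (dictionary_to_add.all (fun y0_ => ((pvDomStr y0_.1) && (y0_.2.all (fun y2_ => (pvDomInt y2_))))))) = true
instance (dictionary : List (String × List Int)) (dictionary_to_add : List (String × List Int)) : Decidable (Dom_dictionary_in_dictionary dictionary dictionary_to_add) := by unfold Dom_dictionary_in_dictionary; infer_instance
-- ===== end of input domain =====

-- B replaces A's per-key scans of dictionary.values() by a reverse index value -> keys maintained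
-- incrementally.  Both Pythons mutate `dictionary` in place and return it; the equivalence proved
-- here is about the RETURN value (dicts as assoc lists).

-- ===== PORT A =====
-- into_dictionary(dictionary, key, v0): called with exactly one extra positional arg in A
def pvIntoDict (d : PySem.Dict String (List Int)) (key : String) (args : List Int) : PySem.Dict String (List Int) :=
  if d.contains key then d.insert key (d.getD key [] ++ args) else d.insert key args

-- delete_value_from_dict: collect keys whose value == value, then delete them
def pvDeleteValue (d : PySem.Dict String (List Int)) (value : List Int) : PySem.Dict String (List Int) :=
  let keysToDelete := d.items.foldl (fun acc p => if p.2 == value then acc ++ [p.1] else acc) ([] : List String)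
  keysToDelete.foldl (fun d k => d.erase k) d

-- loop body of A for one key of dictionary_to_add (v = dictionary_to_add[key]).
-- dictionary_to_add[key][0] is ported as (pyGet? v 0).getD 0: the fallback 0 is only reached where
-- Python raises IndexError, which Pre_ excludes.
def pvStepA (d : PySem.Dict String (List Int)) (key : String) (v : List Int) : PySem.Dict String (List Int) :=
  if v ∉ d.values then d.insert key v
  else pvIntoDict (pvDeleteValue d v) key [(PySem.List.pyGet? v 0).getD 0]

def dictionary_in_dictionary (dictionary : List (String × List Int)) (dictionary_to_add : List (String × List Int)) : List (String × List Int) :=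
  let d0 := PySem.Dict.ofList dictionary
  let da := PySem.Dict.ofList dictionary_to_add
  (da.keys.foldl (fun d key => pvStepA d key (da.getD key [])) d0).items

-- ===== PORT B =====
-- helper unindex(k): drop k from the bucket of dictionary[k]'s value; delete empty buckets.
-- Python's ks.remove(k) is PySem.List.remove?; the .getD [] fallback is only reached where Python
-- would raise ValueError, which never happens when unindex is called (k is always indexed).
def pvUnindex (d : PySem.Dict String (List Int)) (idx : PySem.Dict (List Int) (List String)) (k : String) : PySem.Dict (List Int) (List String) :=
  let tv := d.getD k []
  let ks := (PySem.List.remove? (idx.getD tv []) k).getD []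
  if ks = [] then idx.erase tv else idx.insert tv ks

-- index = {}; for k, v in dictionary.items(): index.setdefault(tuple(v), []).append(k)
def pvBuildIndex (d : PySem.Dict String (List Int)) : PySem.Dict (List Int) (List String) :=
  d.items.foldl (fun idx p => idx.modify p.2 [] (fun l => l ++ [p.1])) PySem.Dict.empty

-- loop body of B for one item (key, value) of dictionary_to_add, on state (dictionary, index)
def pvStepB (st : PySem.Dict String (List Int) × PySem.Dict (List Int) (List String)) (p : String × List Int) : PySem.Dict String (List Int) × PySem.Dict (List Int) (List String) :=
  let d := st.1
  let idx := st.2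
  let key := p.1
  let value := p.2
  if idx.contains value = false then
    let idx := if d.contains key then pvUnindex d idx key else idx
    (d.insert key value, idx.modify value [] (fun l => l ++ [key]))
  else
    let ks := idx.getD value []            -- index.pop(tv)
    let idx := idx.erase value
    let d := ks.foldl (fun d k => d.erase k) d
    if d.contains key then
      let idx := pvUnindex d idx key
      let nv := d.getD key [] ++ [(PySem.List.pyGet? value 0).getD 0]
      (d.insert key nv, idx.modify nv [] (fun l => l ++ [key]))
    else
      let nv := [(PySem.List.pyGet? value 0).getD 0]
      (d.insert key nv, idx.modify nv [] (fun l => l ++ [key]))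

def dictionary_in_dictionary_alt (dictionary : List (String × List Int)) (dictionary_to_add : List (String × List Int)) : List (String × List Int) :=
  let d0 := PySem.Dict.ofList dictionary
  let idx0 := pvBuildIndex d0
  (((PySem.Dict.ofList dictionary_to_add).items.foldl pvStepB (d0, idx0)).1).items

-- ===== PRECONDITION & SPEC =====
-- Pre_ excludes exactly the inputs on which Python A raises IndexError (dictionary_to_add[key][0]
-- on an empty-list value that is present among the current dict values): A raises iff
-- dictionary_to_add has an empty-list value and either it has two of them, or `dictionary` holds an
-- empty-list value under a key not overwritten before the first empty value of dictionary_to_add is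
-- processed.  (B raises there too.)
def Pre_dictionary_in_dictionary (dictionary : List (String × List Int)) (dictionary_to_add : List (String × List Int)) : Prop :=
  let emptyKeys := (dictionary_to_add.filter (fun p => p.2 == ([] : List Int))).map (fun p => p.1)
  emptyKeys = [] ∨
    (emptyKeys.length = 1 ∧
      ∀ p ∈ dictionary, p.2 = ([] : List Int) →
        p.1 ∈ (dictionary_to_add.takeWhile (fun q => !(q.2 == ([] : List Int)))).map (fun q => q.1))
instance (dictionary : List (String × List Int)) (dictionary_to_add : List (String × List Int)) : Decidable (Pre_dictionary_in_dictionary dictionary dictionary_to_add) := by unfold Pre_dictionary_in_dictionary; infer_instance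

def pvWitness_dictionary_in_dictionary : (List (String × List Int)) × (List (String × List Int)) :=
  ([("a", [1, 2]), ("b", [3])], [("b", [1, 2]), ("c", [3])])

def Spec_dictionary_in_dictionary (dictionary : List (String × List Int)) (dictionary_to_add : List (String × List Int)) (out : List (String × List Int)) : Prop := out = dictionary_in_dictionary_alt dictionary dictionary_to_add
instance (dictionary : List (String × List Int)) (dictionary_to_add : List (String × List Int)) (out : List (String × List Int)) : Decidable (Spec_dictionary_in_dictionary dictionary dictionary_to_add out) := by unfold Spec_dictionary_in_dictionary; infer_instance

-- ===== CLAIM (what is proved, stated in full; the proofs are below) =====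
def Claim_equal_dictionary_in_dictionary : Prop := ∀ (dictionary : List (String × List Int)) (dictionary_to_add : List (String × List Int)), Dom_dictionary_in_dictionary dictionary dictionary_to_add → Pre_dictionary_in_dictionary dictionary dictionary_to_add → Spec_dictionary_in_dictionary dictionary dictionary_to_add (dictionary_in_dictionary dictionary dictionary_to_add)

-- ===== LEMMAS AND PROOFS =====

-- The invariant tying B's reverse index to the current dictionary:
-- buckets are duplicate-free, k is in the bucket of v iff d[k] = v, and no bucket is empty.
def pvInv (d : PySem.Dict String (List Int)) (idx : PySem.Dict (List Int) (List String)) : Prop :=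
  d.keys.Nodup ∧
  (∀ v : List Int, (idx.getD v []).Nodup) ∧
  (∀ (v : List Int) (k : String), k ∈ idx.getD v [] ↔ d.get? k = some v) ∧
  (∀ v : List Int, idx.contains v = true → idx.getD v [] ≠ [])

-- like pvInv but for an index that omits exactly the key `key` (state after unindex)
def pvAuxInv (d : PySem.Dict String (List Int)) (idx : PySem.Dict (List Int) (List String)) (key : String) : Prop :=
  (∀ v : List Int, (idx.getD v []).Nodup) ∧
  (∀ (v : List Int) (k : String), k ∈ idx.getD v [] ↔ d.get? k = some v ∧ k ≠ key) ∧
  (∀ v : List Int, idx.contains v = true → idx.getD v [] ≠ [])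

lemma pv_remove?_of_mem {b : List String} {k : String} (h : k ∈ b) :
    PySem.List.remove? b k = some (b.erase k) := by
  simp only [PySem.List.remove?]
  induction b with
  | nil => simp at h
  | cons x xs ih =>
    by_cases hx : x = k
    · subst hx; simp [List.idxOf?_cons, List.erase_cons_head]
    · rcases List.mem_cons.mp h with h1 | h2
      · exact absurd h1.symm hx
      · have := ih h2
        simp only [List.idxOf?_cons, beq_iff_eq]
        rw [if_neg (by simpa [eq_comm] using hx)]
        simp only [Option.map_map]
        rw [List.erase_cons_tail (by simp [hx])]
        cases hq : List.idxOf? k xs with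
        | none => simp [hq] at this
        | some n => simp [hq] at this ⊢; simpa using this

lemma pv_find?_filter_of_imp {α : Type} (l : List α) (p q : α → Bool)
    (h : ∀ x, p x = true → q x = true) : (l.filter q).find? p = l.find? p := by
  induction l with
  | nil => rfl
  | cons x xs ih =>
    by_cases hp : p x = true
    · rw [List.filter_cons, if_pos (h x hp)]; simp [List.find?_cons, hp, ih]
    · rw [List.filter_cons]
      by_cases hq : q x = true
      · simp [hq, List.find?_cons, hp, ih]
      · simp [hq, hp, ih]

lemma pv_getD_erase (idx : PySem.Dict (List Int) (List String)) (tv w : List Int) :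
    (idx.erase tv).getD w [] = if w = tv then [] else idx.getD w [] := by
  by_cases hw : w = tv
  · subst hw
    rw [if_pos rfl]
    apply PySem.Dict.getD_of_not_contains
    simp only [PySem.Dict.erase, PySem.Dict.contains, List.any_filter, List.any_eq_false]
    intro p _
    cases hp : p.1 == w <;> simp [hp]
  · rw [if_neg hw]
    simp only [PySem.Dict.getD, PySem.Dict.get?, PySem.Dict.erase]
    rw [pv_find?_filter_of_imp]
    intro p hp
    simp only [beq_iff_eq] at hp
    simp [hp, hw]

lemma pv_contains_erase {idx : PySem.Dict (List Int) (List String)} {tv w : List Int}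
    (h : (idx.erase tv).contains w = true) : idx.contains w = true ∧ w ≠ tv := by
  simp only [PySem.Dict.erase, PySem.Dict.contains, List.any_filter, List.any_eq_true] at h
  obtain ⟨p, hp, hpp⟩ := h
  have h1 : (p.1 == w) = true := by revert hpp; cases (p.1 == w) <;> simp
  have h2 : (p.1 == tv) = false := by revert hpp; cases hx : p.1 == tv <;> simp [hx]
  constructor
  · simp only [PySem.Dict.contains, List.any_eq_true]
    exact ⟨p, hp, h1⟩
  · intro he; subst he
    rw [h1] at h2; exact Bool.noConfusion h2

lemma pv_find?_filter_val (l : List (String × List Int)) (hn : (l.map Prod.fst).Nodup)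
    (v : List Int) (k : String) :
    (l.filter (fun p => !(p.2 == v))).find? (fun p => p.1 == k)
      = match l.find? (fun p => p.1 == k) with
        | some p => if p.2 = v then none else some p
        | none => none := by
  induction l with
  | nil => rfl
  | cons p ps ih =>
    rw [List.map_cons, List.nodup_cons] at hn
    by_cases hk : p.1 = k
    · rw [List.filter_cons]
      by_cases hv : p.2 = v
      · rw [if_neg (by simp [hv])]
        rw [List.find?_cons_of_pos (by simp [hk])]
        simp only [hv]
        apply List.find?_eq_none.mpr
        intro q hq
        have hq' := List.mem_of_mem_filter hq
        simp only [beq_iff_eq]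
        intro he
        exact hn.1 (List.mem_map.mpr ⟨q, hq', by rw [he, hk]⟩)
      · rw [if_pos (by simp [hv])]
        rw [List.find?_cons_of_pos (by simp [hk]), List.find?_cons_of_pos (by simp [hk])]
        simp [hv]
    · rw [List.filter_cons]
      rw [List.find?_cons_of_neg (by simp [hk])]
      by_cases hv : p.2 = v
      · rw [if_neg (by simp [hv])]
        exact ih hn.2
      · rw [if_pos (by simp [hv])]
        rw [List.find?_cons_of_neg (by simp [hk])]
        exact ih hn.2

lemma pv_get?_filter_ne (d : PySem.Dict String (List Int)) (hn : d.keys.Nodup) (v : List Int) (k : String) :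
    (PySem.Dict.mk (d.items.filter (fun p => !(p.2 == v)))).get? k
      = match d.get? k with
        | some w => if w = v then none else some w
        | none => none := by
  simp only [PySem.Dict.get?]
  rw [pv_find?_filter_val d.items (by simpa [PySem.Dict.keys] using hn) v k]
  cases hf : d.items.find? (fun p => p.1 == k) with
  | none => rfl
  | some p =>
    by_cases hv : p.2 = v <;> simp [hv]

lemma pv_foldl_erase_eq_filter (l : List String) (d : PySem.Dict String (List Int)) :
    l.foldl (fun d k => d.erase k) d
      = PySem.Dict.mk (d.items.filter (fun p => !(l.contains p.1))) := by
  induction l generalizing d with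
  | nil => simp
  | cons k ks ih =>
    rw [List.foldl_cons, ih]
    show PySem.Dict.mk (((d.erase k).items).filter _) = _
    simp only [PySem.Dict.erase, List.filter_filter]
    congr 1
    apply List.filter_congr
    intro p _
    simp only [List.contains_cons]
    cases h1 : p.1 == k <;> cases h2 : ks.contains p.1 <;> simp

-- pvInv gives: the membership test of A and the contains test of B agree
lemma pv_contains_iff_mem_values {d : PySem.Dict String (List Int)} {idx : PySem.Dict (List Int) (List String)}
    (h : pvInv d idx) (v : List Int) : idx.contains v = true ↔ v ∈ d.values := by
  obtain ⟨hnd, _, hmem, hne⟩ := h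
  constructor
  · intro hc
    obtain ⟨k, hk⟩ := List.exists_mem_of_ne_nil _ (hne v hc)
    have hg := (hmem v k).mp hk
    simp only [PySem.Dict.get?, Option.map_eq_some_iff] at hg
    obtain ⟨q, hq, hq2⟩ := hg
    simp only [PySem.Dict.values]
    exact List.mem_map.mpr ⟨q, List.mem_of_find?_eq_some hq, hq2⟩
  · intro hv
    simp only [PySem.Dict.values] at hv
    obtain ⟨p, hp, hpv⟩ := List.mem_map.mp hv
    have hg : d.get? p.1 = some v := by
      have := PySem.Dict.get?_of_mem_items d (k := p.1) (v := p.2) (by simpa using hp) hnd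
      rw [this, hpv]
    have hk : p.1 ∈ idx.getD v [] := (hmem v p.1).mpr hg
    by_contra hc
    have : idx.getD v [] = [] := PySem.Dict.getD_of_not_contains idx [] (by simpa using hc)
    rw [this] at hk; simp at hk

-- erasing the bucket's keys (B) = delete_value_from_dict (A) = filtering out value v
lemma pv_delete_eq_filter {d : PySem.Dict String (List Int)} (hnd : d.keys.Nodup) (v : List Int) :
    pvDeleteValue d v = PySem.Dict.mk (d.items.filter (fun p => !(p.2 == v))) := by
  unfold pvDeleteValue
  rw [PySem.List.foldl_append_if, List.nil_append, pv_foldl_erase_eq_filter]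
  congr 1
  apply List.filter_congr
  intro p hp
  congr 1
  rw [List.contains_eq_mem]
  by_cases hv : p.2 = v
  · have hmm : p.1 ∈ (d.items.filter (fun q => q.2 == v)).map (fun q => q.1) :=
      List.mem_map.mpr ⟨p, List.mem_filter.mpr ⟨hp, by simp [hv]⟩, rfl⟩
    simp [hv, hmm]
  · have hmm : ¬ p.1 ∈ (d.items.filter (fun q => q.2 == v)).map (fun q => q.1) := by
      intro hx
      obtain ⟨q, hq, hq1⟩ := List.mem_map.mp hx
      have hqm := List.mem_of_mem_filter hq
      have hqv := List.of_mem_filter hq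
      have : q = p := List.inj_on_of_nodup_map (by simpa [PySem.Dict.keys] using hnd) hqm hp hq1
      subst this
      exact hv (by simpa using hqv)
    simp [hv, hmm]

lemma pv_bucket_foldl_erase {d : PySem.Dict String (List Int)} {idx : PySem.Dict (List Int) (List String)}
    (h : pvInv d idx) (v : List Int) :
    (idx.getD v []).foldl (fun d k => d.erase k) d
      = PySem.Dict.mk (d.items.filter (fun p => !(p.2 == v))) := by
  obtain ⟨hnd, _, hmem, _⟩ := h
  rw [pv_foldl_erase_eq_filter]
  congr 1
  apply List.filter_congr
  intro p hp
  congr 1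
  rw [List.contains_eq_mem]
  have hp1 : d.get? p.1 = some p.2 := PySem.Dict.get?_of_mem_items d (by simpa using hp) hnd
  by_cases hv : p.2 = v
  · have hmm : p.1 ∈ idx.getD v [] := (hmem v p.1).mpr (by rw [hp1, hv])
    simp [hv, hmm]
  · have hmm : ¬ p.1 ∈ idx.getD v [] := by
      intro hx
      have hx2 := (hmem v p.1).mp hx
      rw [hp1] at hx2
      exact hv (by injection hx2)
    simp [hv, hmm]

-- invariant after the bucket deletion of the else-branch
lemma pv_inv_after_delete {d : PySem.Dict String (List Int)} {idx : PySem.Dict (List Int) (List String)}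
    (h : pvInv d idx) (v : List Int) :
    pvInv (PySem.Dict.mk (d.items.filter (fun p => !(p.2 == v)))) (idx.erase v) := by
  obtain ⟨hnd, hbn, hmem, hne⟩ := h
  have hkeys : (PySem.Dict.mk (d.items.filter (fun p => !(p.2 == v)))).keys.Nodup := by
    simp only [PySem.Dict.keys]
    exact (List.Sublist.map _ List.filter_sublist).nodup (by simpa [PySem.Dict.keys] using hnd)
  refine ⟨hkeys, ?_, ?_, ?_⟩
  · intro w; rw [pv_getD_erase]; split <;> simp [hbn]
  · intro w k
    rw [pv_getD_erase, pv_get?_filter_ne d hnd]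
    by_cases hw : w = v
    · rw [if_pos hw]
      simp only [List.not_mem_nil, false_iff]
      cases hg : d.get? k with
      | none => simp
      | some u => by_cases hu : u = v <;> simp [hu, hw]
    · rw [if_neg hw, hmem]
      cases hg : d.get? k with
      | none => simp
      | some u =>
        by_cases hu : u = v
        · subst hu; simp [Ne.symm hw]
        · simp [hu]
  · intro w hc
    obtain ⟨hcw, hwv⟩ := pv_contains_erase hc
    rw [pv_getD_erase, if_neg hwv]
    exact hne w hcw

-- after unindex (key present in d): the index covers exactly d minus key
lemma pv_auxinv_unindex {d : PySem.Dict String (List Int)} {idx : PySem.Dict (List Int) (List String)}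
    (h : pvInv d idx) {key : String} (hc : d.contains key = true) :
    pvAuxInv d (pvUnindex d idx key) key := by
  obtain ⟨hnd, hbn, hmem, hne⟩ := h
  obtain ⟨tv, htv⟩ : ∃ tv, d.get? key = some tv := by
    rw [PySem.Dict.contains_eq_isSome_get?] at hc
    cases hg : d.get? key with
    | none => rw [hg] at hc; simp at hc
    | some tv => exact ⟨tv, rfl⟩
  have hgd : d.getD key [] = tv := by rw [PySem.Dict.getD_eq_get?_getD, htv]; rfl
  have hkey_mem : key ∈ idx.getD tv [] := (hmem tv key).mpr htv
  simp only [pvUnindex]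
  rw [hgd, pv_remove?_of_mem hkey_mem]
  simp only [Option.getD_some]
  set b := idx.getD tv [] with hb
  have hbnd : b.Nodup := hbn tv
  have herase_mem : ∀ j, j ∈ b.erase key ↔ j ∈ b ∧ j ≠ key := by
    intro j; rw [hbnd.mem_erase_iff]; tauto
  have hgoal : ∀ (idx' : PySem.Dict (List Int) (List String)),
      (∀ w, idx'.getD w [] = if w = tv then b.erase key else idx.getD w []) →
      (∀ w, idx'.contains w = true → idx'.getD w [] ≠ []) →
      pvAuxInv d idx' key := by
    intro idx' hgd' hne'
    refine ⟨?_, ?_, hne'⟩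
    · intro w; rw [hgd']; split
      · exact hbnd.erase _
      · exact hbn w
    · intro w k
      rw [hgd']
      by_cases hw : w = tv
      · subst hw
        rw [if_pos rfl, herase_mem, hb, hmem]
      · rw [if_neg hw, hmem]
        constructor
        · intro hg
          refine ⟨hg, ?_⟩
          intro he; subst he
          rw [htv] at hg
          exact hw (by injection hg with h; exact h.symm)
        · exact fun hg => hg.1
  by_cases hks : b.erase key = []
  · rw [if_pos hks]
    apply hgoal
    · intro w
      rw [pv_getD_erase]
      split
      · exact hks.symm
      · rfl
    · intro w hcw
      obtain ⟨hcw', hwv⟩ := pv_contains_erase hcw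
      rw [pv_getD_erase, if_neg hwv]
      exact hne w hcw'
  · rw [if_neg hks]
    apply hgoal
    · intro w
      rw [PySem.Dict.getD_insert]
    · intro w hcw
      by_cases hw : w = tv
      · subst hw; rw [PySem.Dict.getD_insert, if_pos rfl]; exact hks
      · rw [PySem.Dict.getD_insert, if_neg hw]
        apply hne
        rw [PySem.Dict.contains_insert] at hcw
        simpa [hw] using hcw

-- key absent from d: the old index already covers d minus key
lemma pv_auxinv_id {d : PySem.Dict String (List Int)} {idx : PySem.Dict (List Int) (List String)}
    (h : pvInv d idx) {key : String} (hc : d.contains key = false) :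
    pvAuxInv d idx key := by
  obtain ⟨hnd, hbn, hmem, hne⟩ := h
  refine ⟨hbn, ?_, hne⟩
  intro w k
  rw [hmem]
  constructor
  · intro hg
    refine ⟨hg, ?_⟩
    intro he
    rw [he, (PySem.Dict.get?_eq_none_iff_contains d key).mpr hc] at hg
    simp at hg
  · exact fun hg => hg.1

-- rebuilding the invariant after d.insert key nv / bucket append of key
lemma pv_inv_insert {d : PySem.Dict String (List Int)} {idx : PySem.Dict (List Int) (List String)}
    {key : String} (hnd : d.keys.Nodup) (h : pvAuxInv d idx key) (nv : List Int) :
    pvInv (d.insert key nv) (idx.modify nv [] (fun l => l ++ [key])) := by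
  obtain ⟨hbn, hmem, hne⟩ := h
  have hkeyout : ∀ w, key ∉ idx.getD w [] := by
    intro w hkk
    exact ((hmem w key).mp hkk).2 rfl
  have hgd : ∀ w, (idx.modify nv [] (fun l => l ++ [key])).getD w []
      = if w = nv then idx.getD nv [] ++ [key] else idx.getD w [] := by
    intro w
    simp only [PySem.Dict.modify]
    rw [PySem.Dict.getD_insert]
  refine ⟨PySem.Dict.nodup_keys_insert d key nv hnd, ?_, ?_, ?_⟩
  · intro w; rw [hgd]; split
    · exact List.Nodup.append (hbn nv) (List.nodup_singleton key)
        (by intro a ha hb; simp only [List.mem_singleton] at hb; subst hb; exact hkeyout nv ha)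
    · exact hbn w
  · intro w k
    rw [hgd, PySem.Dict.get?_insert]
    by_cases hw : w = nv
    · rw [hw, if_pos rfl]
      by_cases hk : k = key
      · rw [if_pos hk]
        simp [hk, hkeyout nv]
      · rw [if_neg hk]
        simp only [List.mem_append, List.mem_singleton, hk, or_false]
        rw [hmem]; tauto
    · rw [if_neg hw]
      by_cases hk : k = key
      · rw [if_pos hk]
        constructor
        · intro hkk; exact absurd ((hmem w k).mp hkk).2 (by simp [hk])
        · intro hsome
          exact absurd (by injection hsome with hh; exact hh.symm) hw
      · rw [if_neg hk, hmem]
        exact ⟨fun hg => hg.1, fun hg => ⟨hg, hk⟩⟩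
  · intro w hcw
    rw [hgd]
    by_cases hw : w = nv
    · rw [if_pos hw]; simp
    · rw [if_neg hw]
      apply hne
      simp only [PySem.Dict.modify, PySem.Dict.contains_insert] at hcw
      simpa [hw] using hcw

-- the initial index built by B satisfies the invariant
lemma pv_inv_init (xs : List (String × List Int)) :
    pvInv (PySem.Dict.ofList xs) (pvBuildIndex (PySem.Dict.ofList xs)) := by
  set d := PySem.Dict.ofList xs with hd
  have hnd : d.keys.Nodup := PySem.Dict.nodup_keys_ofList xs
  have hswap : pvBuildIndex d
      = (d.items.map (fun p => (p.2, p.1))).foldl (fun idx q => idx.modify q.1 [] (fun l => l ++ [q.2])) PySem.Dict.empty := by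
    unfold pvBuildIndex
    rw [List.foldl_map]
  have hbi : ∀ v : List Int, (pvBuildIndex d).getD v []
      = (d.items.filter (fun p => p.2 == v)).map (fun p => p.1) := by
    intro v
    rw [hswap, PySem.Dict.getD_foldl_modify_append]
    simp [List.filter_map, Function.comp_def, List.map_map]
  refine ⟨hnd, ?_, ?_, ?_⟩
  · intro v
    rw [hbi]
    exact (List.Sublist.map _ List.filter_sublist).nodup (by simpa [PySem.Dict.keys] using hnd)
  · intro v k
    rw [hbi]
    constructor
    · intro hk
      obtain ⟨p, hp, hp1⟩ := List.mem_map.mp hk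
      have hpv := List.of_mem_filter hp
      have := PySem.Dict.get?_of_mem_items d (k := p.1) (v := p.2)
        (by simpa using List.mem_of_mem_filter hp) hnd
      rw [hp1] at this; rw [this]
      simpa using hpv
    · intro hg
      have hkv : (k, v) ∈ d.items := (PySem.Dict.get?_eq_some_iff_mem_items d k v hnd).mp hg
      exact List.mem_map.mpr ⟨(k, v), List.mem_filter.mpr ⟨hkv, by simp⟩, rfl⟩
  · intro v hcv
    rw [hbi]
    rw [hswap] at hcv
    rw [PySem.Dict.contains_iff_mem_keys] at hcv
    rw [PySem.Dict.keys_foldl_modify_key (d.items.map (fun p => (p.2, p.1)))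
      (fun q => q.1) ([] : List String) (fun _ q l => l ++ [q.2]) PySem.Dict.empty] at hcv
    have hek : (PySem.Dict.empty : PySem.Dict (List Int) (List String)).keys = ([] : List (List Int)) := rfl
    rw [hek, PySem.Set.update_nil_left, PySem.Set.mem_ofList] at hcv
    obtain ⟨q, hq, hq1⟩ := List.mem_map.mp hcv
    obtain ⟨p, hp, hp1⟩ := List.mem_map.mp hq
    have hpv : p.2 = v := by rw [← hp1] at hq1; exact hq1
    have hpm : p ∈ d.items.filter (fun r => r.2 == v) :=
      List.mem_filter.mpr ⟨hp, by simp [hpv]⟩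
    intro hnil
    rw [List.map_eq_nil_iff] at hnil
    rw [hnil] at hpm
    simp at hpm

-- one step: same dictionary, invariant preserved
lemma pv_step (d : PySem.Dict String (List Int)) (idx : PySem.Dict (List Int) (List String))
    (p : String × List Int) (h : pvInv d idx) :
    (pvStepB (d, idx) p).1 = pvStepA d p.1 p.2 ∧ pvInv (pvStepB (d, idx) p).1 (pvStepB (d, idx) p).2 := by
  have hnd := h.1
  have hciff := pv_contains_iff_mem_values h p.2
  simp only [pvStepB, pvStepA, pvIntoDict]
  by_cases hc : idx.contains p.2 = true
  · have hmemv : p.2 ∈ d.values := hciff.mp hc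
    have hcf : ¬ (idx.contains p.2 = false) := by simp [hc]
    have hnv : ¬ (p.2 ∉ d.values) := not_not_intro hmemv
    rw [if_neg hcf, if_neg hnv, pv_bucket_foldl_erase h p.2, pv_delete_eq_filter hnd p.2]
    have hinv1 := pv_inv_after_delete h p.2
    have hnd1 := hinv1.1
    by_cases hck : (PySem.Dict.mk (d.items.filter (fun q => !(q.2 == p.2)))).contains p.1 = true
    · rw [if_pos hck, if_pos hck]
      exact ⟨rfl, pv_inv_insert hnd1 (pv_auxinv_unindex hinv1 hck) _⟩
    · rw [if_neg hck, if_neg hck]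
      exact ⟨rfl, pv_inv_insert hnd1 (pv_auxinv_id hinv1 (Bool.eq_false_iff.mpr hck)) _⟩
  · have hmemv : p.2 ∉ d.values := fun hm => hc (hciff.mpr hm)
    have hct : idx.contains p.2 = false := by simpa using hc
    rw [if_pos hct, if_pos hmemv]
    by_cases hck : d.contains p.1 = true
    · rw [if_pos hck]
      exact ⟨rfl, pv_inv_insert hnd (pv_auxinv_unindex h hck) _⟩
    · rw [if_neg hck]
      exact ⟨rfl, pv_inv_insert hnd (pv_auxinv_id h (Bool.eq_false_iff.mpr hck)) _⟩

lemma pv_loop (l : List (String × List Int)) :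
    ∀ (d : PySem.Dict String (List Int)) (idx : PySem.Dict (List Int) (List String)), pvInv d idx →
    (l.foldl pvStepB (d, idx)).1 = l.foldl (fun d p => pvStepA d p.1 p.2) d := by
  induction l with
  | nil => intro d idx _; rfl
  | cons p ps ih =>
    intro d idx h
    obtain ⟨heq, hinv⟩ := pv_step d idx p h
    simp only [List.foldl_cons]
    rw [← heq]
    have := ih (pvStepB (d, idx) p).1 (pvStepB (d, idx) p).2 hinv
    rw [Prod.mk.eta] at this
    exact this

-- ===== VERDICT (by name: the statement is the Claim_ definition above) =====
theorem dictionary_in_dictionary_spec : Claim_equal_dictionary_in_dictionary := by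
  intro dictionary dictionary_to_add _ _
  unfold Spec_dictionary_in_dictionary dictionary_in_dictionary dictionary_in_dictionary_alt
  simp only
  congr 1
  rw [pv_loop (PySem.Dict.ofList dictionary_to_add).items (PySem.Dict.ofList dictionary)
    (pvBuildIndex (PySem.Dict.ofList dictionary)) (pv_inv_init dictionary)]
  have hkf : (PySem.Dict.ofList dictionary_to_add).keys.foldl
        (fun d key => pvStepA d key ((PySem.Dict.ofList dictionary_to_add).getD key [])) (PySem.Dict.ofList dictionary)
      = (PySem.Dict.ofList dictionary_to_add).items.foldl
        (fun d p => pvStepA d p.1 ((PySem.Dict.ofList dictionary_to_add).getD p.1 [])) (PySem.Dict.ofList dictionary) := by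
    simp only [PySem.Dict.keys]
    rw [List.foldl_map]
  rw [hkf]
  apply PySem.List.foldl_congr_mem
  intro acc p hp
  rw [PySem.Dict.getD_of_mem_items (PySem.Dict.ofList dictionary_to_add) (by simpa using hp)
    (PySem.Dict.nodup_keys_ofList _)]
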